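-- pv_equiv track=rewrite | github.com/akshaykhandelwal0710/BMP_to_JPEG | encoder.py | get_cat
-- ===== SOURCE A (Python) =====
-- def get_cat(num): ##extracting position of msb to determine what length of bits it will need to be encoded
--     num = int(abs(num))
--     ans = 0
--     pwr = 1
--     while pwr <= num:
--         pwr <<= 1
--         ans += 1
--     return ans
-- ===== SOURCE B (Python) =====
-- def get_cat(num):
--     return int(abs(num)).bit_length()
-- ===== Notes on version B (the rewrite author's own statement) =====
-- stated objective: idiomatic
-- what changed: Replaces the hand-rolled doubling loop with counter by a single call to int.bit_length on the magnitude.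
import Mathlib
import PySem

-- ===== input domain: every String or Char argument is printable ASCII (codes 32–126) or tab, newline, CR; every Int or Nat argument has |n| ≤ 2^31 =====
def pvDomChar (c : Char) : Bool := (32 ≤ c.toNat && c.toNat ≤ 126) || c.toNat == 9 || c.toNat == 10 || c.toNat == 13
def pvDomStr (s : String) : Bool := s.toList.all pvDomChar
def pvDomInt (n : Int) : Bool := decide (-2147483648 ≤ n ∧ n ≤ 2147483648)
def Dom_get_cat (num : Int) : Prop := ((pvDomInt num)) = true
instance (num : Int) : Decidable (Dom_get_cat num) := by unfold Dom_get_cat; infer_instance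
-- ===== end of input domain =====

-- B replaces A's doubling loop with the library bit-length of the magnitude (idiomatic, same cost class).

-- ===== PORT A =====
-- the while loop: pwr doubles while pwr <= num; the positivity of pwr justifies termination
def get_cat_loop (n : Nat) (pwr : Nat) (ans : Nat) (h : 0 < pwr) : Nat :=
  if _hle : pwr ≤ n then get_cat_loop n (2 * pwr) (ans + 1) (by omega) else ans
termination_by n + 1 - pwr
decreasing_by omega

def get_cat (num : Int) : Int :=
  (get_cat_loop num.natAbs 1 0 (by omega) : Int)

-- ===== PORT B =====
-- int(abs(num)).bit_length() ported as Nat.size of the magnitude (Lean's bit-length)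
def get_cat_alt (num : Int) : Int := (Nat.size num.natAbs : Int)

-- ===== PRECONDITION & SPEC =====
def Spec_get_cat (num : Int) (out : Int) : Prop := out = get_cat_alt num
instance (num : Int) (out : Int) : Decidable (Spec_get_cat num out) := by unfold Spec_get_cat; infer_instance

-- ===== CLAIM (what is proved, stated in full; the proofs are below) =====
def Claim_equal_get_cat : Prop := ∀ (num : Int), Dom_get_cat num → Spec_get_cat num (get_cat num)

-- ===== LEMMAS AND PROOFS =====

-- ===== VERDICT (by name: the statement is the Claim_ definition above) =====
-- loop invariant: starting from pwr = 2^k, the loop adds (size n - k) to the accumulator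
theorem get_cat_loop_eq (d : Nat) : ∀ (n k ans : Nat) (h : 0 < 2 ^ k),
    n.size - k = d → get_cat_loop n (2 ^ k) ans h = ans + d := by
  induction d with
  | zero =>
    intro n k ans h hd
    have hlt : n < 2 ^ k := Nat.size_le.mp (by omega)
    rw [get_cat_loop]
    simp [Nat.not_le.mpr hlt]
  | succ d ih =>
    intro n k ans h hd
    have hk : k < n.size := by omega
    have hle : 2 ^ k ≤ n := by
      by_contra hc
      exact absurd (Nat.size_le.mpr (Nat.not_le.mp hc)) (by omega)
    rw [get_cat_loop]
    simp only [hle, dite_true]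
    have h2 : (2 * 2 ^ k : Nat) = 2 ^ (k + 1) := by ring
    simp only [h2]
    have := ih n (k + 1) (ans + 1) (by positivity) (by omega)
    omega

theorem get_cat_spec : Claim_equal_get_cat := by
  intro num _
  unfold Spec_get_cat get_cat get_cat_alt
  have := get_cat_loop_eq num.natAbs.size num.natAbs 0 0 (by norm_num) (by simp)
  simp only [pow_zero] at this
  rw [this]
  simp
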